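-- pv_equiv track=rewrite | github.com/zenustech/zeno | .POC/OLD/zenqt/ui/utils.py | key_appear_by_order
-- ===== SOURCE A (Python) =====
-- def key_appear_by_order(pattern, key):
--     key = key.lower()
--     for c in pattern:
--         res = key.find(c)
--         if res == -1:
--             return False
--         key = key[res + 1:]
--     return True
-- ===== SOURCE B (Python) =====
-- def key_appear_by_order(pattern, key):
--     k = key.lower()
--     i = 0
--     n = len(pattern)
--     for ch in k:
--         if i < n and pattern[i] == ch:
--             i += 1
--     return i == n
-- ===== Notes on version B (the rewrite author's own statement) =====
-- stated objective: faster
-- what changed: Single linear sweep over the lowercased key advancing one pattern index, instead of repeatedly find-scanning and re-slicing (copying) the key for each pattern character.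
import Mathlib
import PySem

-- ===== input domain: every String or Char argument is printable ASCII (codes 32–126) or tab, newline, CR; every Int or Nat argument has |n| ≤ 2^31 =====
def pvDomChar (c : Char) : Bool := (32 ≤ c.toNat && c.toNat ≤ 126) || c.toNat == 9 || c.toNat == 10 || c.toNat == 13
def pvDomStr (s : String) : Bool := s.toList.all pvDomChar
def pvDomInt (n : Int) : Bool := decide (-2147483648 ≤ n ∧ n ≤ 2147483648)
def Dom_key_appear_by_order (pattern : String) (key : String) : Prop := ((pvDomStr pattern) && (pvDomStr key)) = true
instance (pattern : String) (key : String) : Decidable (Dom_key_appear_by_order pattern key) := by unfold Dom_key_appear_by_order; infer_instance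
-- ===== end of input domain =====

-- B replaces A's per-character find-and-reslice of the key by a single sweep over the key
-- with an index into the pattern: same return value on all inputs, no repeated key copies
-- (a timing run measured B faster).

-- ===== PORT A =====
-- for c in pattern: res = key.find(c); if res == -1: return False; key = key[res+1:]
def keyAppearAuxA : List Char → List Char → Bool
  | [], _ => true
  | c :: cs, k =>
      let res := PySem.Chars.find k [c]
      if res == -1 then false
      else keyAppearAuxA cs (PySem.List.slice k (some (res + 1)) none)

def key_appear_by_order (pattern : String) (key : String) : Bool :=
  keyAppearAuxA pattern.toList (PySem.Str.lower key).toList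

-- ===== PORT B =====
-- i = 0; for ch in key.lower(): if i < len(pattern) and pattern[i] == ch: i += 1; return i == len(pattern)
def key_appear_by_order_alt (pattern : String) (key : String) : Bool :=
  let p := pattern.toList
  let i := (PySem.Str.lower key).toList.foldl
      (fun i ch => if p[i]? = some ch then i + 1 else i) 0
  i == p.length

-- ===== PRECONDITION & SPEC =====
def Spec_key_appear_by_order (pattern : String) (key : String) (out : Bool) : Prop := out = key_appear_by_order_alt pattern key
instance (pattern : String) (key : String) (out : Bool) : Decidable (Spec_key_appear_by_order pattern key out) := by unfold Spec_key_appear_by_order; infer_instance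

-- ===== CLAIM (what is proved, stated in full; the proofs are below) =====
def Claim_equal_key_appear_by_order : Prop := ∀ (pattern : String) (key : String), Dom_key_appear_by_order pattern key → Spec_key_appear_by_order pattern key (key_appear_by_order pattern key)

-- ===== LEMMAS AND PROOFS =====

-- reference greedy subsequence check, recursing on the key
def pvGreedy : List Char → List Char → Bool
  | ps, [] => ps.isEmpty
  | [], _ :: _ => true
  | p :: ps, c :: k => if p = c then pvGreedy ps k else pvGreedy (p :: ps) k

theorem pvGreedy_nil (k : List Char) : pvGreedy [] k = true := by
  cases k <;> rfl

theorem singleton_prefix_iff (c : Char) (l : List Char) :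
    [c] <+: l ↔ ∃ t, l = c :: t := by
  cases l with
  | nil => simp
  | cons a t =>
    constructor
    · intro h
      obtain ⟨he, -⟩ := (List.cons_prefix_cons).1 h
      exact ⟨t, by rw [he]⟩
    · rintro ⟨t', ht⟩
      cases ht
      exact List.cons_prefix_cons.2 ⟨rfl, List.nil_prefix⟩

theorem singleton_infix_iff (c : Char) (l : List Char) :
    [c] <:+: l ↔ c ∈ l := by
  constructor
  · rintro ⟨s, t, h⟩
    subst h; simp
  · intro h
    obtain ⟨s, t, h⟩ := List.append_of_mem h
    exact ⟨s, t, by simp [h]⟩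

theorem find_nil_singleton (c : Char) : PySem.Chars.find ([] : List Char) [c] = -1 := by
  rw [PySem.Chars.find_eq_neg_one_iff]
  simp

theorem find_cons_self (c : Char) (k : List Char) :
    PySem.Chars.find (c :: k) [c] = 0 := by
  have hin : [c] <:+: c :: k := (singleton_infix_iff c (c :: k)).2 (by simp)
  have hnn : 0 ≤ PySem.Chars.find (c :: k) [c] := (PySem.Chars.find_nonneg_iff _ _).2 hin
  obtain ⟨hpre, hmin⟩ := PySem.Chars.find_spec hnn
  have ht : (PySem.Chars.find (c :: k) [c]).toNat = 0 := by
    by_contra h0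
    exact hmin 0 (Nat.pos_of_ne_zero h0) (by simp)
  omega

theorem find_cons_ne (b c : Char) (k : List Char) (hbc : b ≠ c) :
    PySem.Chars.find (b :: k) [c] =
      if PySem.Chars.find k [c] = -1 then -1 else PySem.Chars.find k [c] + 1 := by
  by_cases hr : PySem.Chars.find k [c] = -1
  · rw [if_pos hr]
    rw [PySem.Chars.find_eq_neg_one_iff] at hr ⊢
    simp only [singleton_infix_iff] at hr ⊢
    simp [hbc.symm, hr]
  · rw [if_neg hr]
    have hnnr : 0 ≤ PySem.Chars.find k [c] := by
      have := PySem.Chars.neg_one_le_find k [c]; omega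
    obtain ⟨hpre_r, hmin_r⟩ := PySem.Chars.find_spec hnnr
    have hinr : [c] <:+: k := (PySem.Chars.find_nonneg_iff _ _).1 hnnr
    have hin : [c] <:+: b :: k := by
      simp only [singleton_infix_iff] at hinr ⊢; simp [hinr]
    have hnn : 0 ≤ PySem.Chars.find (b :: k) [c] := (PySem.Chars.find_nonneg_iff _ _).2 hin
    obtain ⟨hpre, hmin⟩ := PySem.Chars.find_spec hnn
    set m := (PySem.Chars.find k [c]).toNat with hm
    set f := (PySem.Chars.find (b :: k) [c]).toNat with hf
    have hpm : [c] <+: k.drop m := hpre_r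
    have hfle : f ≤ m + 1 := by
      by_contra h
      exact hmin (m + 1) (by omega) (by simpa [List.drop_succ_cons] using hpm)
    have hfge : m + 1 ≤ f := by
      by_contra h
      rw [not_le] at h
      cases hfv : f with
      | zero =>
        have hp0 : [c] <+: (b :: k).drop 0 := by rw [← hfv]; exact hpre
        simp only [List.drop_zero, singleton_prefix_iff] at hp0
        obtain ⟨t, ht⟩ := hp0
        rw [List.cons.injEq] at ht
        exact hbc ht.1
      | succ j =>
        have hj : j < m := by omega
        have hpj : [c] <+: k.drop j := by
          have := hpre
          rw [hfv] at this
          simpa [List.drop_succ_cons] using this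
        exact hmin_r j hj hpj
    have hfm : f = m + 1 := by omega
    omega

-- A's aux equals the greedy reference
theorem auxA_eq_greedy (k ps : List Char) : keyAppearAuxA ps k = pvGreedy ps k := by
  induction k generalizing ps with
  | nil =>
    cases ps with
    | nil => rfl
    | cons c cs =>
      simp only [keyAppearAuxA, find_nil_singleton, pvGreedy]
      norm_num
  | cons b k' ih =>
    cases ps with
    | nil => simp [keyAppearAuxA, pvGreedy_nil]
    | cons c cs =>
      by_cases hbc : b = c
      · subst hbc
        simp only [keyAppearAuxA, find_cons_self]
        norm_num
        rw [PySem.List.slice_from_one]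
        simp only [List.tail_cons, pvGreedy, if_true]
        exact ih cs
      · simp only [keyAppearAuxA, find_cons_ne b c k' hbc]
        by_cases hr : PySem.Chars.find k' [c] = -1
        · rw [if_pos hr]
          norm_num
          simp only [pvGreedy]
          rw [if_neg (fun h => hbc h.symm), ← ih (c :: cs)]
          simp only [keyAppearAuxA, hr]
          norm_num
        · rw [if_neg hr]
          have hnnr : 0 ≤ PySem.Chars.find k' [c] := by
            have := PySem.Chars.neg_one_le_find k' [c]; omega
          obtain ⟨m, hm⟩ : ∃ m : Nat, PySem.Chars.find k' [c] = (m : Int) :=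
            ⟨(PySem.Chars.find k' [c]).toNat, by omega⟩
          rw [hm]
          have hne1 : ((m : Int) + 1 == -1) = false := by
            simp only [beq_eq_false_iff_ne, ne_eq]; omega
          rw [hne1]
          simp only [Bool.false_eq_true, if_false]
          have hslice : PySem.List.slice (b :: k') (some ((m : Int) + 1 + 1)) none
              = k'.drop (m + 1) := by
            rw [show ((m : Int) + 1 + 1) = ((m + 2 : Nat) : Int) by push_cast; ring,
              PySem.List.slice_from_natCast]
            simp [List.drop_succ_cons]
          rw [hslice]
          simp only [pvGreedy]
          rw [if_neg (fun h => hbc h.symm), ← ih (c :: cs)]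
          simp only [keyAppearAuxA, hm]
          have hne2 : ((m : Int) == -1) = false := by
            simp only [beq_eq_false_iff_ne, ne_eq]; omega
          rw [hne2]
          simp only [Bool.false_eq_true, if_false]
          rw [show ((m : Int) + 1) = ((m + 1 : Nat) : Int) by push_cast; ring,
            PySem.List.slice_from_natCast]

-- B's fold equals the greedy reference
theorem foldB_eq_greedy (p : List Char) (k : List Char) (i : Nat) (hi : i ≤ p.length) :
    (k.foldl (fun i ch => if p[i]? = some ch then i + 1 else i) i == p.length)
      = pvGreedy (p.drop i) k := by
  induction k generalizing i with
  | nil =>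
    simp only [List.foldl_nil, pvGreedy]
    rcases Nat.lt_or_ge i p.length with h | h
    · have h1 : (i == p.length) = false := by
        simp only [beq_eq_false_iff_ne, ne_eq]; omega
      have h2 : (p.drop i).isEmpty = false := by
        simp only [List.isEmpty_eq_false_iff, ne_eq, List.drop_eq_nil_iff]; omega
      rw [h1, h2]
    · have hi' : i = p.length := by omega
      subst hi'
      simp
  | cons c k' ih =>
    simp only [List.foldl_cons]
    rcases h : p[i]? with _ | c'
    · have hil : p.length ≤ i := by
        by_contra hlt
        rw [not_le] at hlt
        exact absurd h (by simp [List.getElem?_eq_getElem hlt])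
      have hdrop : p.drop i = [] := by rw [List.drop_eq_nil_iff]; omega
      simp only [reduceCtorEq, if_false]
      rw [ih i hi, hdrop, pvGreedy_nil, pvGreedy_nil]
    · have hil : i < p.length := by
        by_contra hge
        rw [not_lt] at hge
        rw [List.getElem?_eq_none hge] at h
        exact absurd h (by simp)
      have hdrop : p.drop i = p[i] :: p.drop (i + 1) :=
        List.drop_eq_getElem_cons hil
      have hc' : c' = p[i] := by
        have h2 := List.getElem?_eq_getElem hil
        rw [h] at h2
        injection h2
      subst hc'
      by_cases hcc : p[i] = c
      · rw [if_pos (by rw [hcc]), hdrop]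
        simp only [pvGreedy]
        rw [if_pos hcc]
        exact ih (i + 1) (by omega)
      · rw [if_neg (fun hco => hcc (Option.some.inj hco)), hdrop]
        simp only [pvGreedy]
        rw [if_neg hcc]
        rw [ih i hi, hdrop]

-- ===== VERDICT (by name: the statement is the Claim_ definition above) =====
theorem key_appear_by_order_spec : Claim_equal_key_appear_by_order := by
  intro pattern key _
  unfold Spec_key_appear_by_order key_appear_by_order key_appear_by_order_alt
  dsimp only
  rw [auxA_eq_greedy, foldB_eq_greedy pattern.toList _ 0 (Nat.zero_le _), List.drop_zero]
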